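-- pv_equiv track=rewrite | github.com/SteinX/memory-mcp-1file | evals/lib/metrics.py | expected_rank
-- ===== SOURCE A (Python) =====
-- from typing import Any, Iterable, Mapping, Sequence
--
-- def _as_id_list(values: Sequence[Any] | Iterable[Any]) -> list[str]:
--     return [str(value) for value in values]
--
-- def _expected_id_set(expected_ids: Sequence[Any] | Iterable[Any]) -> set[str]:
--     return set(_as_id_list(expected_ids))
--
-- def expected_rank(result_ids: Sequence[Any] | Iterable[Any], expected_ids: Sequence[Any] | Iterable[Any]) -> int | None:
--     expected = _expected_id_set(expected_ids)
--     if not expected: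
--         return None
--     for index, result_id in enumerate(_as_id_list(result_ids), start=1):
--         if result_id in expected:
--             return index
--     return None
-- ===== SOURCE B (Python) =====
-- def expected_rank(result_ids, expected_ids):
--     expected = [str(v) for v in expected_ids]
--     if not expected:
--         return None
--     pos = {}
--     for rank, result_id in enumerate(result_ids, start=1):
--         pos.setdefault(str(result_id), rank)
--     ranks = [pos[e] for e in expected if e in pos]
--     return min(ranks) if ranks else None
-- ===== Notes on version B (the rewrite author's own statement) =====
-- stated objective: alternative
-- what changed: Inverted the traversal: instead of scanning results against a set of expected ids, B builds a dict from each result id to its first-occurrence 1-based rank in one pass and returns the minimum rank found among the expected ids.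
import Mathlib
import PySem

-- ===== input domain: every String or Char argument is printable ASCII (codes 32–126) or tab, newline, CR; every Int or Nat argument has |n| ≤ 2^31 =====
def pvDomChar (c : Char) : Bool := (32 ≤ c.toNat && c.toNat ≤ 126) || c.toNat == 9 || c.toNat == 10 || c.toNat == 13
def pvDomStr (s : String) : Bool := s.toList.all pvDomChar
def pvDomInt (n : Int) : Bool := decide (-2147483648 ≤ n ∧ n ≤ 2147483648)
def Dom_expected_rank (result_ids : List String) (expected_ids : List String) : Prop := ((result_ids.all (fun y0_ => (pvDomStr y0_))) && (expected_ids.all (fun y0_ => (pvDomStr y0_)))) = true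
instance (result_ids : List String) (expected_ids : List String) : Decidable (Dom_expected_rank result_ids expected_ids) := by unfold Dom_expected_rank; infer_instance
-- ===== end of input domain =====

-- ===== PORT A =====
-- B replaces A's scan of results against an expected-id set by a first-rank dict indexed by expected ids (alternative decomposition, same cost).
-- '_as_id_list' maps str over the values; on List String inputs str is the identity, so it is ported as the list itself.

-- A's 'for index, result_id in enumerate(..., start=1): if result_id in expected: return index' loop
def pvALoop (expected : PySem.Set String) : List (Int × String) → Option Int
  | [] => none
  | (i, r) :: rest => if expected.contains r then some i else pvALoop expected rest

def expected_rank (result_ids : List String) (expected_ids : List String) : Option Int :=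
  let expected := PySem.Set.ofList expected_ids
  if expected = [] then none
  else pvALoop expected (PySem.List.enumerate result_ids 1)

-- ===== PORT B =====
-- 'pos.setdefault(result_id, rank)' folded over enumerate(result_ids, start=1)
def pvBStep (d : PySem.Dict String Int) (p : Int × String) : PySem.Dict String Int :=
  if d.contains p.2 then d else d.insert p.2 p.1

def expected_rank_alt (result_ids : List String) (expected_ids : List String) : Option Int :=
  let expected := expected_ids
  if expected = [] then none
  else
    let pos := (PySem.List.enumerate result_ids 1).foldl pvBStep PySem.Dict.empty
    let ranks := expected.filterMap (fun e => pos.get? e)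
    if ranks = [] then none else PySem.List.min? ranks (fun x => x)

-- ===== PRECONDITION & SPEC =====
def Spec_expected_rank (result_ids : List String) (expected_ids : List String) (out : Option Int) : Prop := out = expected_rank_alt result_ids expected_ids
instance (result_ids : List String) (expected_ids : List String) (out : Option Int) : Decidable (Spec_expected_rank result_ids expected_ids out) := by unfold Spec_expected_rank; infer_instance

-- ===== CLAIM (what is proved, stated in full; the proofs are below) =====
def Claim_equal_expected_rank : Prop := ∀ (result_ids : List String) (expected_ids : List String), Dom_expected_rank result_ids expected_ids → Spec_expected_rank result_ids expected_ids (expected_rank result_ids expected_ids)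

-- ===== LEMMAS AND PROOFS =====

-- setdefault fold: final lookup is the initial dict's value, else the value from a fold started empty
theorem pvBStep_get?_or (l : List (Int × String)) (d : PySem.Dict String Int) (e : String) :
    (l.foldl pvBStep d).get? e = ((d.get? e).or ((l.foldl pvBStep PySem.Dict.empty).get? e)) := by
  induction l generalizing d with
  | nil => simp [PySem.Dict.get?_empty]
  | cons p l ih =>
    obtain ⟨i, r⟩ := p
    simp only [List.foldl_cons]
    rw [ih (pvBStep d (i, r)), ih (pvBStep PySem.Dict.empty (i, r))]
    have hstep : ∀ d' : PySem.Dict String Int, (pvBStep d' (i, r)).get? e =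
        if d'.contains r then d'.get? e else (d'.insert r i).get? e := by
      intro d'; simp only [pvBStep]; split_ifs <;> rfl
    rw [hstep, hstep]
    by_cases her : e = r
    · subst her
      simp only [PySem.Dict.contains_eq_isSome_get?, PySem.Dict.get?_empty,
        PySem.Dict.get?_insert_self, Option.isSome_none, Bool.false_eq_true, if_false]
      cases h : d.get? e <;> simp [Option.or]
    · have h1 : (d.insert r i).get? e = d.get? e := PySem.Dict.get?_insert_of_ne d i her
      have h2 : (PySem.Dict.empty.insert r i).get? e = (PySem.Dict.empty (κ := String) (ν := Int)).get? e :=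
        PySem.Dict.get?_insert_of_ne _ i her
      simp only [h1, h2, PySem.Dict.get?_empty]
      split_ifs <;> simp [Option.or]

-- every rank stored by the setdefault fold comes from the initial dict or from a pair of the list
theorem pvBStep_get?_mem (l : List (Int × String)) (d : PySem.Dict String Int) (e : String) (v : Int)
    (h : (l.foldl pvBStep d).get? e = some v) : d.get? e = some v ∨ (v, e) ∈ l := by
  induction l generalizing d with
  | nil => exact Or.inl h
  | cons p l ih =>
    obtain ⟨i, r⟩ := p
    simp only [List.foldl_cons] at h
    rcases ih (pvBStep d (i, r)) h with h' | h'
    · simp only [pvBStep] at h'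
      split_ifs at h' with hc
      · exact Or.inl h'
      · by_cases her : e = r
        · subst her
          rw [PySem.Dict.get?_insert_self] at h'
          obtain rfl : i = v := Option.some.inj h'
          exact Or.inr (List.mem_cons_self)
        · rw [PySem.Dict.get?_insert_of_ne d i her] at h'
          exact Or.inl h'
    · exact Or.inr (List.mem_cons_of_mem _ h')

-- the foldl computing min over Int, from a some accumulator
theorem pvMinFold (l : List Int) (m0 : Int) :
    ∃ r, l.foldl (fun acc x => match acc with
        | none => some x
        | some m => if x < m then some x else some m) (some m0) = some r ∧
      (r = m0 ∨ r ∈ l) ∧ r ≤ m0 ∧ ∀ x ∈ l, r ≤ x := by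
  induction l generalizing m0 with
  | nil => exact ⟨m0, rfl, Or.inl rfl, le_refl m0, by simp⟩
  | cons a l ih =>
    simp only [List.foldl_cons]
    by_cases ha : a < m0
    · simp only [if_pos ha]
      obtain ⟨r, hr, hmem, hle, hall⟩ := ih a
      refine ⟨r, hr, ?_, (lt_of_le_of_lt hle ha).le, ?_⟩
      · rcases hmem with h | h
        · exact Or.inr (by rw [h]; exact List.mem_cons_self)
        · exact Or.inr (List.mem_cons_of_mem _ h)
      · intro x hx
        rcases List.mem_cons.mp hx with h | h
        · exact h ▸ hle
        · exact hall x h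
    · simp only [if_neg ha]
      obtain ⟨r, hr, hmem, hle, hall⟩ := ih m0
      refine ⟨r, hr, ?_, hle, ?_⟩
      · rcases hmem with h | h
        · exact Or.inl h
        · exact Or.inr (List.mem_cons_of_mem _ h)
      · intro x hx
        rcases List.mem_cons.mp hx with h | h
        · exact h ▸ le_trans hle (not_lt.mp ha)
        · exact hall x h

-- unfolding PySem.List.min? with the identity key to its foldl
theorem pvMin?_eq_foldl (l : List Int) : PySem.List.min? l (fun x => x) = l.foldl (fun acc x => match acc with
    | none => some x
    | some m => if x < m then some x else some m) none := by
  unfold PySem.List.min?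
  congr 1
  funext acc x
  cases acc <;> rfl

-- min(l) = k when k is a lower bound belonging to l
theorem pvMin?_eq (l : List Int) (k : Int) (hk : k ∈ l) (hb : ∀ x ∈ l, k ≤ x) :
    PySem.List.min? l (fun x => x) = some k := by
  cases l with
  | nil => cases hk
  | cons a t =>
    obtain ⟨r, hr, hmem, hle, hall⟩ := pvMinFold t a
    have hra : PySem.List.min? (a :: t) (fun x : Int => x) = some r := by
      rw [pvMin?_eq_foldl, List.foldl_cons]
      exact hr
    have hrk : r = k := by
      have h1 : k ≤ r := by
        rcases hmem with h | h
        · exact h ▸ hb a List.mem_cons_self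
        · exact hb r (List.mem_cons_of_mem _ h)
      have h2 : r ≤ k := by
        rcases List.mem_cons.mp hk with h | h
        · exact h ▸ hle
        · exact hall k h
      omega
    exact hrk ▸ hra

-- main invariant: A's scan from rank k equals min over expected of B's first-rank table built from rank k
theorem pvMain (expected_ids : List String) (rs : List String) (k : Int) :
    pvALoop (PySem.Set.ofList expected_ids) (PySem.List.enumerate rs k) =
      PySem.List.min?
        (expected_ids.filterMap (fun e => ((PySem.List.enumerate rs k).foldl pvBStep PySem.Dict.empty).get? e))
        (fun x => x) := by
  induction rs generalizing k with
  | nil =>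
    simp [PySem.List.enumerate, pvALoop, PySem.Dict.get?_empty, PySem.List.min?]
  | cons r rs ih =>
    rw [PySem.List.enumerate_cons]
    have hfold : ∀ e, (((k, r) :: PySem.List.enumerate rs (k + 1)).foldl pvBStep PySem.Dict.empty).get? e =
        if e = r then some k
        else ((PySem.List.enumerate rs (k + 1)).foldl pvBStep PySem.Dict.empty).get? e := by
      intro e
      simp only [List.foldl_cons]
      have h0 : pvBStep PySem.Dict.empty (k, r) = (PySem.Dict.empty.insert r k : PySem.Dict String Int) := by
        simp [pvBStep, PySem.Dict.contains_eq_isSome_get?, PySem.Dict.get?_empty]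
      rw [h0, pvBStep_get?_or]
      by_cases her : e = r
      · subst her; simp [PySem.Dict.get?_insert_self, Option.or]
      · rw [if_neg her, PySem.Dict.get?_insert_of_ne _ k her]
        simp [PySem.Dict.get?_empty, Option.or]
    have hA : ∀ (i : Int) (x : String) (rest : List (Int × String)),
        pvALoop (PySem.Set.ofList expected_ids) ((i, x) :: rest) =
          if (PySem.Set.ofList expected_ids).contains x then some i
          else pvALoop (PySem.Set.ofList expected_ids) rest := fun i x rest => rfl
    by_cases hc : r ∈ expected_ids
    · have hcontains : (PySem.Set.ofList expected_ids).contains r = true := by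
        have : r ∈ PySem.Set.ofList expected_ids := (PySem.Set.mem_ofList _ _).mpr hc
        simpa [PySem.Set.contains] using this
      rw [hA, if_pos hcontains]
      symm
      apply pvMin?_eq
      · exact List.mem_filterMap.mpr ⟨r, hc, by rw [hfold r]; simp⟩
      · intro x hx
        obtain ⟨e, _, hfe⟩ := List.mem_filterMap.mp hx
        rw [hfold e] at hfe
        split_ifs at hfe with her
        · exact le_of_eq (Option.some.inj hfe)
        · rcases pvBStep_get?_mem _ _ _ _ hfe with h | h
          · rw [PySem.Dict.get?_empty] at h; cases h
          · have : x ∈ (PySem.List.enumerate rs (k + 1)).map (fun p => p.1) :=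
              List.mem_map.mpr ⟨(x, e), h, rfl⟩
            rw [PySem.List.map_fst_enumerate] at this
            have := (PySem.List.mem_pyRange_one).mp this
            omega
    · have hcontains : (PySem.Set.ofList expected_ids).contains r = false := by
        have : r ∉ PySem.Set.ofList expected_ids := fun h => hc ((PySem.Set.mem_ofList _ _).mp h)
        simpa [PySem.Set.contains] using this
      rw [hA, if_neg (by simp [hc])]
      rw [ih (k + 1)]
      congr 1
      apply List.filterMap_congr
      intro e he
      rw [hfold e, if_neg (by intro h; exact hc (h ▸ he))]

-- ===== VERDICT (by name: the statement is the Claim_ definition above) =====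
theorem expected_rank_spec : Claim_equal_expected_rank := by
  intro result_ids expected_ids _
  unfold Spec_expected_rank expected_rank expected_rank_alt
  cases expected_ids with
  | nil => rfl
  | cons e es =>
    have hne : PySem.Set.ofList (e :: es) ≠ [] := by
      intro h
      have : e ∈ PySem.Set.ofList (e :: es) := (PySem.Set.mem_ofList _ _).mpr (List.mem_cons_self)
      rw [h] at this; cases this
    simp only [if_neg hne, if_neg (List.cons_ne_nil e es)]
    rw [pvMain (e :: es) result_ids 1]
    set ranks := (e :: es).filterMap
      (fun x => ((PySem.List.enumerate result_ids 1).foldl pvBStep PySem.Dict.empty).get? x) with hranks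
    cases hr : ranks with
    | nil => simp [PySem.List.min?]
    | cons a t => simp
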